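-- pv_equiv track=rewrite | github.com/drew-ellingson/advent_of_code_2018 | day_05/soln.py | poly_reduce_one
-- ===== SOURCE A (Python) =====
-- def cancels(cur, suc):
--     return cur.lower() == suc.lower() and cur != suc
--
-- def poly_reduce_one(polymer):
--     for i in range(len(polymer) - 1):
--         cur = polymer[i]
--         suc = polymer[i + 1]
--         if cancels(cur, suc):
--             reduced_polymer = polymer[:i] + polymer[i + 2 :]
--             return reduced_polymer
--     # slow
--     # polymer = [x for i, x in enumerate(polymer[:-2]) if not cancels(polymer[i], polymer[i+1])]
--     return polymer
-- ===== SOURCE B (Python) =====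
-- def poly_reduce_one(polymer):
--     letters = [chr(o) for o in range(ord('a'), ord('z') + 1)]
--     pairs = [c + c.upper() for c in letters] + [c.upper() + c for c in letters]
--     hits = [j for j in (polymer.find(p) for p in pairs) if j != -1]
--     if not hits:
--         return polymer
--     i = min(hits)
--     return polymer[:i] + polymer[i + 2:]
-- ===== Notes on version B (the rewrite author's own statement) =====
-- stated objective: alternative
-- what changed: B enumerates the 52 possible cancelling two-character pair strings once, locates each with str.find, and cuts at the minimum found index, instead of A's indexed left-to-right scan with a per-position case comparison; moving the scan into the C-level str.find makes it measurably faster despite the 52 passes.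
import Mathlib
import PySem

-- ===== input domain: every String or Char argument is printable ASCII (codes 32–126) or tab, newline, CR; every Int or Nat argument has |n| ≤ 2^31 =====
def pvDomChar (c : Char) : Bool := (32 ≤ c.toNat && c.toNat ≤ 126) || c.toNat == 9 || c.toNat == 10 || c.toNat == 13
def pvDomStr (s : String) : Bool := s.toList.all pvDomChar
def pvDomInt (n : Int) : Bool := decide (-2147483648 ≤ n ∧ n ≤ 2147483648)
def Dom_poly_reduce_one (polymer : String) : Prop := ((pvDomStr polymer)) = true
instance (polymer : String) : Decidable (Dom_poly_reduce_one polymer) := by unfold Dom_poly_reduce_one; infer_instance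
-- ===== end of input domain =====

-- B replaces A's single indexed scan by 52 per-pair substring searches (str.find for each
-- cancelling two-letter pair string) combined by min (alternative algorithm, same result).

-- ===== PORT A =====
-- cancels(cur, suc) on single characters (polymer[i] is a 1-char str; str.lower on one ASCII char is lowerChar)
def cancels (cur suc : Char) : Bool :=
  PySem.Chars.lowerChar cur == PySem.Chars.lowerChar suc && cur != suc

-- 'for i in range(len(polymer) - 1): … return …' as recursion on the index i
def polyLoopA (s : List Char) (i : Nat) : List Char :=
  if h : i + 1 < s.length then
    if cancels s[i] s[i+1] then
      s.take i ++ s.drop (i + 2)   -- polymer[:i] + polymer[i+2:]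
    else polyLoopA s (i + 1)
  else s
termination_by s.length - i

def poly_reduce_one (polymer : String) : String :=
  String.ofList (polyLoopA polymer.toList 0)

-- ===== PORT B =====
-- letters = [chr(o) for o in range(ord('a'), ord('z')+1)]
def lettersB : List Char := (PySem.List.pyRange 97 123 1).map (fun o => Char.ofNat o.toNat)

-- pairs = [c + c.upper() for c in letters] + [c.upper() + c for c in letters]
def pairsB : List (List Char) :=
  lettersB.map (fun c => [c, PySem.Chars.upperChar c])
    ++ lettersB.map (fun c => [PySem.Chars.upperChar c, c])

-- hits = [j for j in (polymer.find(p) for p in pairs) if j != -1]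
def hitsB (s : List Char) : List Int :=
  (pairsB.map (fun p => PySem.Chars.find s p)).filter (fun j => j != -1)

def poly_reduce_one_alt (polymer : String) : String :=
  match PySem.List.min? (hitsB polymer.toList) (fun j => j) with   -- 'if not hits' / min(hits)
  | none => polymer
  | some i =>   -- i ≥ 0 here, so the Python slices are take/drop
      String.ofList (polymer.toList.take i.toNat ++ polymer.toList.drop (i.toNat + 2))

-- ===== PRECONDITION & SPEC =====
def Spec_poly_reduce_one (polymer : String) (out : String) : Prop := out = poly_reduce_one_alt polymer
instance (polymer : String) (out : String) : Decidable (Spec_poly_reduce_one polymer out) := by unfold Spec_poly_reduce_one; infer_instance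

-- ===== CLAIM (what is proved, stated in full; the proofs are below) =====
def Claim_equal_poly_reduce_one : Prop := ∀ (polymer : String), Dom_poly_reduce_one polymer → Spec_poly_reduce_one polymer (poly_reduce_one polymer)

-- ===== LEMMAS AND PROOFS =====

theorem char_eq_of_toNat (c d : Char) (h : c.toNat = d.toNat) : c = d := by
  apply Char.ext; unfold Char.toNat at h; exact UInt32.toNat_inj.mp h

theorem domChar_lt (c : Char) (hc : pvDomChar c = true) : c.toNat < 128 := by
  unfold pvDomChar at hc
  simp only [Bool.or_eq_true, Bool.and_eq_true, decide_eq_true_eq, beq_iff_eq] at hc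
  omega

theorem lower_toNat : ∀ n < 128, (PySem.Chars.lowerChar (Char.ofNat n)).toNat
    = if 65 ≤ n ∧ n ≤ 90 then n + 32 else n := by decide

theorem upper_toNat : ∀ n < 128, (PySem.Chars.upperChar (Char.ofNat n)).toNat
    = if 97 ≤ n ∧ n ≤ 122 then n - 32 else n := by decide

theorem ofNat_toNat_small : ∀ n < 128, (Char.ofNat n).toNat = n := by decide

theorem lettersB_eq : lettersB = (List.range 26).map (fun k => Char.ofNat (97 + k)) := by decide

-- the arithmetic shape of a cancelling pair of ASCII characters
def pairArith (c d : Char) : Prop :=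
  (97 ≤ c.toNat ∧ c.toNat ≤ 122 ∧ d.toNat + 32 = c.toNat) ∨
  (65 ≤ c.toNat ∧ c.toNat ≤ 90 ∧ d.toNat = c.toNat + 32)

theorem mem_pairsB_iff (c d : Char) : [c, d] ∈ pairsB ↔ pairArith c d := by
  rw [pairsB, lettersB_eq]
  simp only [List.mem_append, List.mem_map, List.mem_range]
  constructor
  · rintro (⟨e, ⟨k, hk, rfl⟩, he⟩ | ⟨e, ⟨k, hk, rfl⟩, he⟩)
    · obtain ⟨rfl, rfl⟩ : Char.ofNat (97 + k) = c ∧ PySem.Chars.upperChar (Char.ofNat (97 + k)) = d := by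
        simpa using he
      have h1 := ofNat_toNat_small (97 + k) (by omega)
      have h2 := upper_toNat (97 + k) (by omega)
      rw [if_pos (by omega)] at h2
      left; omega
    · obtain ⟨rfl, rfl⟩ : PySem.Chars.upperChar (Char.ofNat (97 + k)) = c ∧ Char.ofNat (97 + k) = d := by
        simpa using he
      have h1 := ofNat_toNat_small (97 + k) (by omega)
      have h2 := upper_toNat (97 + k) (by omega)
      rw [if_pos (by omega)] at h2
      right; omega
  · rintro (⟨h1, h2, h3⟩ | ⟨h1, h2, h3⟩)
    · refine Or.inl ⟨c, ⟨c.toNat - 97, by omega, ?_⟩, ?_⟩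
      · have : 97 + (c.toNat - 97) = c.toNat := by omega
        rw [this, Char.ofNat_toNat]
      · have hu := upper_toNat c.toNat (by omega)
        rw [Char.ofNat_toNat, if_pos (by omega)] at hu
        have : PySem.Chars.upperChar c = d := char_eq_of_toNat _ _ (by omega)
        simp [this]
    · refine Or.inr ⟨d, ⟨d.toNat - 97, by omega, ?_⟩, ?_⟩
      · have : 97 + (d.toNat - 97) = d.toNat := by omega
        rw [this, Char.ofNat_toNat]
      · have hu := upper_toNat d.toNat (by omega)
        rw [Char.ofNat_toNat, if_pos (by omega)] at hu
        have : PySem.Chars.upperChar d = c := char_eq_of_toNat _ _ (by omega)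
        simp [this]

theorem cancels_iff_arith (c d : Char) (hc : c.toNat < 128) (hd : d.toNat < 128) :
    cancels c d = true ↔ pairArith c d := by
  unfold cancels
  simp only [Bool.and_eq_true, beq_iff_eq, bne_iff_ne, ne_eq]
  have hl := lower_toNat c.toNat hc
  have hl' := lower_toNat d.toNat hd
  rw [Char.ofNat_toNat] at hl hl'
  constructor
  · rintro ⟨he, hne⟩
    have ht : (PySem.Chars.lowerChar c).toNat = (PySem.Chars.lowerChar d).toNat := by rw [he]
    rw [hl, hl'] at ht
    have hnet : c.toNat ≠ d.toNat := fun h => hne (char_eq_of_toNat _ _ h)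
    unfold pairArith
    split_ifs at ht <;> omega
  · intro hp
    unfold pairArith at hp
    constructor
    · apply char_eq_of_toNat
      rw [hl, hl']
      split_ifs <;> omega
    · intro he
      rw [he] at hp
      omega

-- A's cancellation test ⟺ the two-char window is one of B's 52 pair strings (on Dom chars)
theorem cancels_iff_mem (c d : Char) (hc : pvDomChar c = true) (hd : pvDomChar d = true) :
    cancels c d = true ↔ [c, d] ∈ pairsB := by
  rw [cancels_iff_arith c d (domChar_lt c hc) (domChar_lt d hd), mem_pairsB_iff]

-- the window test at position k, totalised with a default character
def winC (s : List Char) (k : Nat) : Bool := cancels (s.getD k ' ') (s.getD (k+1) ' ')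

theorem winC_eq (s : List Char) (i : Nat) (h : i + 1 < s.length) :
    winC s i = cancels s[i] s[i+1] := by
  unfold winC
  rw [List.getD_eq_getElem _ _ (by omega : i < s.length), List.getD_eq_getElem _ _ h]

-- a 2-element list is a prefix of s.drop j iff the two window chars at j, j+1 are those chars
theorem prefix2_iff (s : List Char) (a b : Char) (j : Nat) :
    [a, b] <+: s.drop j ↔ j + 1 < s.length ∧ s[j]? = some a ∧ s[j+1]? = some b := by
  constructor
  · rintro ⟨t, ht⟩
    have hl := congrArg List.length ht
    simp only [List.length_append, List.length_cons, List.length_nil, List.length_drop] at hl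
    have hj1 : j + 1 < s.length := by omega
    refine ⟨hj1, ?_, ?_⟩
    · have h0 : (s.drop j)[0]? = some a := by rw [← ht]; rfl
      simpa [List.getElem?_drop] using h0
    · have h1 : (s.drop j)[1]? = some b := by rw [← ht]; rfl
      simpa [List.getElem?_drop] using h1
  · rintro ⟨hj1, ha, hb⟩
    refine ⟨s.drop (j + 2), ?_⟩
    have h0 : (s.drop j)[0]? = some a := by simpa [List.getElem?_drop] using ha
    have h1 : (s.drop j)[1]? = some b := by simpa [List.getElem?_drop] using hb
    match hd : s.drop j with
    | [] => simp [hd] at h0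
    | [x] => simp [hd] at h1
    | x :: y :: rest =>
      rw [hd] at h0 h1
      simp only [List.getElem?_cons_zero, Option.some.injEq] at h0
      simp only [List.getElem?_cons_succ, List.getElem?_cons_zero, Option.some.injEq] at h1
      subst h0; subst h1
      have hrest : s.drop (j + 2) = rest := by
        have := congrArg (List.drop 2) hd
        simpa [List.drop_drop, Nat.add_comm] using this
      simp [hrest]

-- every pair string has length 2
theorem pairsB_len : ∀ q ∈ pairsB, q.length = 2 := by decide

-- a hit of B corresponds to a cancelling window at that index
theorem hit_window (s : List Char) (hs : s.all pvDomChar = true) (j : Int)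
    (hj : j ∈ hitsB s) :
    0 ≤ j ∧ j.toNat + 1 < s.length ∧ winC s j.toNat = true := by
  unfold hitsB at hj
  simp only [List.mem_filter, List.mem_map, bne_iff_ne, ne_eq] at hj
  obtain ⟨⟨p, hp, hf⟩, hne⟩ := hj
  have hge : (-1 : Int) ≤ j := hf ▸ PySem.Chars.neg_one_le_find s p
  have hj0 : 0 ≤ j := by omega
  have hfnn : 0 ≤ PySem.Chars.find s p := hf ▸ hj0
  obtain ⟨hpre, -⟩ := PySem.Chars.find_spec hfnn
  rw [hf] at hpre
  match p, pairsB_len p hp with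
  | [a, b], _ =>
    obtain ⟨hlt, ha, hb⟩ := (prefix2_iff s a b j.toNat).mp hpre
    have ha' : s.getD j.toNat ' ' = a := by
      rw [List.getD_eq_getElem _ _ (by omega : j.toNat < s.length)]
      have := List.getElem?_eq_getElem (l := s) (by omega : j.toNat < s.length)
      rw [this] at ha; simpa using ha
    have hb' : s.getD (j.toNat + 1) ' ' = b := by
      rw [List.getD_eq_getElem _ _ hlt]
      have := List.getElem?_eq_getElem (l := s) hlt
      rw [this] at hb; simpa using hb
    have hda : pvDomChar a = true := List.all_eq_true.mp hs _ (List.mem_of_getElem? ha)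
    have hdb : pvDomChar b = true := List.all_eq_true.mp hs _ (List.mem_of_getElem? hb)
    refine ⟨hj0, hlt, ?_⟩
    unfold winC
    rw [ha', hb']
    exact (cancels_iff_mem a b hda hdb).mpr hp

-- A's loop when no window from i on cancels
theorem polyLoopA_none (s : List Char) (i : Nat)
    (h : ∀ j, i ≤ j → j + 1 < s.length → winC s j = false) :
    polyLoopA s i = s := by
  rw [polyLoopA]
  split
  · next hj =>
    have hw := h i le_rfl hj
    rw [winC_eq s i hj] at hw
    rw [hw]
    simp only [Bool.false_eq_true, if_false]
    exact polyLoopA_none s (i + 1) (fun j hij => h j (by omega))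
  · rfl
termination_by s.length - i

-- A's loop when i0 is the first cancelling window at or after i
theorem polyLoopA_found (s : List Char) (i i0 : Nat) (hi : i ≤ i0) (hlt : i0 + 1 < s.length)
    (hc : winC s i0 = true)
    (hmin : ∀ j, i ≤ j → j < i0 → j + 1 < s.length → winC s j = false) :
    polyLoopA s i = s.take i0 ++ s.drop (i0 + 2) := by
  rw [polyLoopA]
  have hi1 : i + 1 < s.length := by omega
  simp only [hi1, dif_pos]
  by_cases hii : i = i0
  · subst hii
    rw [winC_eq s i hlt] at hc
    rw [hc]; simp
  · have hw := hmin i le_rfl (by omega) hi1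
    rw [winC_eq s i hi1] at hw
    rw [hw]
    simp only [Bool.false_eq_true, if_false]
    exact polyLoopA_found s (i + 1) i0 (by omega) hlt hc (fun j h1 h2 h3 => hmin j (by omega) h2 h3)
termination_by s.length - i

-- ===== VERDICT (by name: the statement is the Claim_ definition above) =====
theorem poly_reduce_one_spec : Claim_equal_poly_reduce_one := by
  intro polymer hdom
  unfold Spec_poly_reduce_one poly_reduce_one poly_reduce_one_alt
  have hs : polymer.toList.all pvDomChar = true := hdom
  set s := polymer.toList with hsdef
  by_cases hex : ∃ k, k + 1 < s.length ∧ winC s k = true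
  · -- there is a cancelling window; let i0 be the first one
    obtain ⟨hlt, hwin⟩ := Nat.find_spec hex
    set i0 := Nat.find hex with hi0def
    have hfirst : ∀ j, j < i0 → j + 1 < s.length → winC s j = false := by
      intro j hj hjl
      have := Nat.find_min hex hj
      by_contra hc
      exact this ⟨hjl, by revert hc; cases winC s j <;> simp⟩
    -- the pair at window i0 is one of B's pair strings
    have hdi0 : i0 < s.length := by omega
    have ha' : s.getD i0 ' ' = s[i0] := List.getD_eq_getElem _ _ hdi0
    have hb' : s.getD (i0+1) ' ' = s[i0+1] := List.getD_eq_getElem _ _ hlt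
    have hq : [s[i0], s[i0+1]] ∈ pairsB := by
      have := hwin
      unfold winC at this
      rw [ha', hb'] at this
      exact (cancels_iff_mem _ _ (List.all_eq_true.mp hs _ (List.getElem_mem _))
        (List.all_eq_true.mp hs _ (List.getElem_mem _))).mp this
    set q : List Char := [s[i0], s[i0+1]] with hqdef
    have hqpre : q <+: s.drop i0 :=
      (prefix2_iff s _ _ i0).mpr ⟨hlt, List.getElem?_eq_getElem hdi0, List.getElem?_eq_getElem hlt⟩
    have hqinf : q <:+: s :=
      hqpre.isInfix.trans (List.drop_suffix i0 s).isInfix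
    have hfq0 : 0 ≤ PySem.Chars.find s q := (PySem.Chars.find_nonneg_iff s q).mpr hqinf
    obtain ⟨-, hfmin⟩ := PySem.Chars.find_spec hfq0
    have hfle : PySem.Chars.find s q ≤ (i0 : Int) := by
      by_contra hgt
      have : i0 < (PySem.Chars.find s q).toNat := by omega
      exact hfmin i0 this hqpre
    have hfmem : PySem.Chars.find s q ∈ hitsB s := by
      unfold hitsB
      simp only [List.mem_filter, List.mem_map, bne_iff_ne, ne_eq]
      exact ⟨⟨q, hq, rfl⟩, by omega⟩
    have hne : hitsB s ≠ [] := fun h => by rw [h] at hfmem; exact absurd hfmem (List.not_mem_nil)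
    obtain ⟨m, hm⟩ : ∃ m, PySem.List.min? (hitsB s) (fun j => j) = some m := by
      cases hmm : PySem.List.min? (hitsB s) (fun j => j) with
      | none => exact absurd ((PySem.List.min?_eq_none_iff _ _).mp hmm) hne
      | some m => exact ⟨m, rfl⟩
    have hmmem : m ∈ hitsB s := PySem.List.min?_mem hm
    obtain ⟨hm0, hmlt, hmwin⟩ := hit_window s hs m hmmem
    have hmge : (i0 : Int) ≤ m := by
      have : i0 ≤ m.toNat := Nat.find_le ⟨hmlt, hmwin⟩
      omega
    have hmle : m ≤ PySem.Chars.find s q := PySem.List.min?_isMin hm _ hfmem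
    have hmeq : m = (i0 : Int) := le_antisymm (le_trans hmle hfle) hmge
    rw [hm, hmeq]
    show String.ofList (polyLoopA s 0) = String.ofList (List.take i0 s ++ List.drop (i0 + 2) s)
    rw [polyLoopA_found s 0 i0 (Nat.zero_le _) hlt hwin (fun j _ h2 h3 => hfirst j h2 h3)]
  · -- no cancelling window anywhere: B finds no pair, A's loop falls through
    push Not at hex
    have hnil : hitsB s = [] := by
      rw [List.eq_nil_iff_forall_not_mem]
      intro j hj
      obtain ⟨-, hlt, hwin⟩ := hit_window s hs j hj
      exact absurd hwin (by simpa using hex j.toNat hlt)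
    rw [hnil]
    have hmin : PySem.List.min? ([] : List Int) (fun j => j) = none :=
      (PySem.List.min?_eq_none_iff _ _).mpr rfl
    rw [hmin]
    rw [polyLoopA_none s 0 (fun j _ hjl => by simpa using hex j hjl)]
    exact String.ofList_toList
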